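-- pv_equiv track=rewrite | github.com/Nijanshu/Python | subsets.py | find_m_sized_subsets
-- ===== SOURCE A (Python) =====
-- def find_m_sized_subsets(arr, m):
--     """
--     Finds all subsets of size m from the array arr.
--     """
--     subsets = []
--     n = len(arr)
--
--     # Helper function for backtracking
--     def backtrack(start_index, current_subset):
--         # Base Case: If the current subset is of size m, add it to results
--         if len(current_subset) == m:
--             subsets.append(current_subset[:]) # Use [:] to append a copy
--             return
--
--         # Iterate through the array starting from start_index
--         for i in range(start_index, n):
--             # Include the element at index i
--             current_subset.append(arr[i])
--
--             # Move to the next element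
--             backtrack(i + 1, current_subset)
--
--             # Backtrack: Remove the last element to try the next one
--             current_subset.pop()
--
--     backtrack(0, [])
--     return subsets
-- ===== SOURCE B (Python) =====
-- def find_m_sized_subsets(arr, m):
--     """
--     Finds all subsets of size m from the array arr.
--     Pure structural recursion on the list: a combination of size k either
--     includes the head (followed by a (k-1)-combination of the tail) or
--     skips it (a k-combination of the tail).
--     """
--     def comb(lst, k):
--         if k == 0:
--             return [[]]
--         if not lst:
--             return []
--         rest = lst[1:]
--         return [[lst[0]] + c for c in comb(rest, k - 1)] + comb(rest, k)
--     return comb(list(arr), m)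
-- ===== Notes on version B (the rewrite author's own statement) =====
-- stated objective: alternative
-- what changed: Replaced the mutable backtracking (shared accumulator, append/pop on a current subset, index loop over start_index) by a pure structural recursion on the list: comb(lst,k) = [[]] if k==0, [] if lst empty, else head-included combinations plus tail combinations, composed with list comprehensions.
import Mathlib
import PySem

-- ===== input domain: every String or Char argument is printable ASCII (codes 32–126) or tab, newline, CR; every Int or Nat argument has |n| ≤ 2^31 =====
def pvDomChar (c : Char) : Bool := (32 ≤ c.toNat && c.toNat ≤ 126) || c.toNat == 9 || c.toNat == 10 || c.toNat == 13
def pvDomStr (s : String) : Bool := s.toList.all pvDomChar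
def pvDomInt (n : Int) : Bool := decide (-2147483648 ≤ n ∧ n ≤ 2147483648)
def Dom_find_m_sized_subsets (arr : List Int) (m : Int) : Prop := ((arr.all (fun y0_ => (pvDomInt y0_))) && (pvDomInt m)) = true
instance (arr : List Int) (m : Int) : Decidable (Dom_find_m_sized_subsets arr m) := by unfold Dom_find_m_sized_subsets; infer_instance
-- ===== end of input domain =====

-- B replaces A's mutable backtracking (shared accumulator, append/pop, index loop) by a
-- pure structural recursion on the list (include-the-head / skip-the-head); objective: alternative.

-- ===== PORT A =====
-- A's inner `backtrack` (the `for` loop is the helper `pvA_loop`, one call per index i of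
-- range(start, n)); `current_subset.append`/`pop` around the recursive call is passed as
-- `cur ++ [arr[i]]`, and the global `subsets` accumulator is returned as the concatenation
-- of the appends in the same (DFS) order.
mutual
def pvA_bt (arr : List Int) (m : Int) (start : Nat) (cur : List Int) : List (List Int) :=
  if (cur.length : Int) = m then [cur]
  else pvA_loop arr m start cur
termination_by (arr.length + 1 - start, 1)

def pvA_loop (arr : List Int) (m : Int) (i : Nat) (cur : List Int) : List (List Int) :=
  if h : i < arr.length then
    pvA_bt arr m (i + 1) (cur ++ [arr[i]]) ++ pvA_loop arr m (i + 1) cur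
  else []
termination_by (arr.length + 1 - i, 0)
decreasing_by
  · exact Prod.Lex.left _ _ (by omega)
  · exact Prod.Lex.left _ _ (by omega)
end

def find_m_sized_subsets (arr : List Int) (m : Int) : List (List Int) :=
  pvA_bt arr m 0 []

-- ===== PORT B =====
-- B's `comb`: a k-combination of lst either starts with lst[0] or is a k-combination of lst[1:].
def pvB_comb (lst : List Int) (k : Int) : List (List Int) :=
  if k = 0 then [[]]
  else
    match lst with
    | [] => []
    | x :: rest => (pvB_comb rest (k - 1)).map (fun c => x :: c) ++ pvB_comb rest k

def find_m_sized_subsets_alt (arr : List Int) (m : Int) : List (List Int) :=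
  pvB_comb arr m

-- ===== PRECONDITION & SPEC =====
def Spec_find_m_sized_subsets (arr : List Int) (m : Int) (out : List (List Int)) : Prop := out = find_m_sized_subsets_alt arr m
instance (arr : List Int) (m : Int) (out : List (List Int)) : Decidable (Spec_find_m_sized_subsets arr m out) := by unfold Spec_find_m_sized_subsets; infer_instance

-- ===== CLAIM (what is proved, stated in full; the proofs are below) =====
def Claim_equal_find_m_sized_subsets : Prop := ∀ (arr : List Int) (m : Int), Dom_find_m_sized_subsets arr m → Spec_find_m_sized_subsets arr m (find_m_sized_subsets arr m)

-- ===== LEMMAS AND PROOFS =====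

-- The invariant: backtracking from `start` with partial subset `cur` produces exactly the
-- (m - |cur|)-combinations of the suffix arr[start:], each prefixed with cur, in the same order.
theorem pvA_eq_comb (arr : List Int) (m : Int) :
    ∀ (d start : Nat), arr.length - start ≤ d → ∀ (cur : List Int),
      pvA_bt arr m start cur
        = (pvB_comb (arr.drop start) (m - cur.length)).map (fun c => cur ++ c) ∧
      ((cur.length : Int) ≠ m →
        pvA_loop arr m start cur
          = (pvB_comb (arr.drop start) (m - cur.length)).map (fun c => cur ++ c)) := by
  intro d
  induction d with
  | zero =>
      intro start hle cur
      have hge : arr.length ≤ start := by omega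
      have hdrop : arr.drop start = [] := List.drop_eq_nil_of_le hge
      constructor
      · rw [pvA_bt]
        by_cases hm : (cur.length : Int) = m
        · simp [hm, hdrop, pvB_comb]
        · have hk : m - (cur.length : Int) ≠ 0 := by omega
          rw [pvA_loop]
          simp [hdrop, pvB_comb, hk, Nat.not_lt.mpr hge, hm]
      · intro hm
        have hk : m - (cur.length : Int) ≠ 0 := by omega
        rw [pvA_loop]
        simp [hdrop, pvB_comb, hk, Nat.not_lt.mpr hge]
  | succ d ih =>
      intro start hle cur
      have hloop : (cur.length : Int) ≠ m →
          pvA_loop arr m start cur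
            = (pvB_comb (arr.drop start) (m - cur.length)).map (fun c => cur ++ c) := by
        intro hm
        have hk : m - (cur.length : Int) ≠ 0 := by omega
        by_cases h : start < arr.length
        · rw [pvA_loop]
          simp only [h, dif_pos]
          have hdrop : arr.drop start = arr[start] :: arr.drop (start + 1) :=
            List.drop_eq_getElem_cons h
          have h1 := (ih (start + 1) (by omega) (cur ++ [arr[start]])).1
          have h2 := (ih (start + 1) (by omega) cur).2 hm
          rw [h1, h2, hdrop]
          rw [pvB_comb]
          simp only [if_neg hk]
          have hlen : ((cur ++ [arr[start]]).length : Int) = (cur.length : Int) + 1 := by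
            simp
          rw [hlen]
          have harg : m - ((cur.length : Int) + 1) = m - (cur.length : Int) - 1 := by ring
          rw [harg]
          simp [List.map_map, Function.comp, List.map_append]
        · have hge : arr.length ≤ start := by omega
          have hdrop : arr.drop start = [] := List.drop_eq_nil_of_le hge
          rw [pvA_loop]
          simp [hdrop, pvB_comb, hk, Nat.not_lt.mpr hge]
      constructor
      · rw [pvA_bt]
        by_cases hm : (cur.length : Int) = m
        · cases List.drop start arr <;> simp [hm, pvB_comb]
        · simpa [hm] using hloop hm
      · exact hloop

-- ===== VERDICT (by name: the statement is the Claim_ definition above) =====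
theorem find_m_sized_subsets_spec : Claim_equal_find_m_sized_subsets := by
  intro arr m _
  unfold Spec_find_m_sized_subsets find_m_sized_subsets find_m_sized_subsets_alt
  have h := (pvA_eq_comb arr m arr.length 0 (by omega) []).1
  simpa using h
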